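-- pv_equiv track=rewrite | github.com/inhooinu/algorithm_study_CodeTree | 250827/함수를 이용한 온전수 판별/determining-the-whole-number-using-a-function.py | perfect
-- ===== SOURCE A (Python) =====
-- def perfect(A, B):
--     cnt = 0
--
--     for num in range(A, B+1):
--         if num%2==0:
--             continue
--         if num%10==5:
--             continue
--         if num%3==0 and num%9!=0:
--             continue
--
--         cnt += 1
--
--     return cnt
-- ===== SOURCE B (Python) =====
-- # O(1) closed form: validity is periodic mod 90 (lcm of 2, 10, 9),
-- # so count = full-period blocks * per-period count + partial-prefix counts.
--
-- _PERIOD = 90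
--
-- def _valid(r):
--     return r % 2 != 0 and r % 10 != 5 and not (r % 3 == 0 and r % 9 != 0)
--
-- _FULL = sum(1 for x in range(_PERIOD) if _valid(x))
--
-- def _prefix(n):
--     # number of valid integers in [0, n) for n >= 0, extended by periodicity to all n
--     q, r = divmod(n, _PERIOD)
--     return q * _FULL + sum(1 for x in range(r) if _valid(x))
--
-- def perfect(A, B):
--     if B < A:
--         return 0
--     return _prefix(B + 1) - _prefix(A)
-- ===== Notes on version B (the rewrite author's own statement) =====
-- stated objective: faster
-- what changed: Replaced the per-number scan of [A,B] by a closed form: validity is periodic mod 90 (lcm of 2,10,9), so B counts valid residues per 90-block once and combines full blocks with a constant-size prefix.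
import Mathlib
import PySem

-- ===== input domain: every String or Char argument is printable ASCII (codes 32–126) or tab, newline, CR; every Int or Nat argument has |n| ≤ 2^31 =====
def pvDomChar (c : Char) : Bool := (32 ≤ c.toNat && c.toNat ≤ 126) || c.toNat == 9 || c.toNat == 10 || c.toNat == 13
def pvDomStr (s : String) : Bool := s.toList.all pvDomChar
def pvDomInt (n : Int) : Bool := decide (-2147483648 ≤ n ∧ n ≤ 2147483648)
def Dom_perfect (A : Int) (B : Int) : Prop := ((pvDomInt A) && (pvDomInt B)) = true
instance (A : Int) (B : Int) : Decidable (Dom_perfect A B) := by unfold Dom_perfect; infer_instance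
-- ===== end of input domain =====

-- B replaces A's per-number scan of [A,B] by an O(1) closed form using the mod-90
-- periodicity of the filter (objective: faster, asymptotic).

-- ===== PORT A =====
def perfect (A : Int) (B : Int) : Int :=
  (PySem.List.pyRange A (B + 1) 1).foldl (fun cnt num =>
    if PySem.Int.mod num 2 = 0 then cnt
    else if PySem.Int.mod num 10 = 5 then cnt
    else if PySem.Int.mod num 3 = 0 ∧ PySem.Int.mod num 9 ≠ 0 then cnt
    else cnt + 1) 0

-- ===== PORT B =====
-- _valid(r) of Source B
def pvValid (r : Int) : Bool :=
  decide (PySem.Int.mod r 2 ≠ 0) && decide (PySem.Int.mod r 10 ≠ 5) &&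
    !(decide (PySem.Int.mod r 3 = 0) && decide (PySem.Int.mod r 9 ≠ 0))

-- sum(1 for x in range(r) if _valid(x))
def pvSumValid (r : Int) : Int :=
  (PySem.List.pyRange 0 r 1).foldl (fun c x => if pvValid x then c + 1 else c) 0

-- _FULL
def pvFull : Int := pvSumValid 90

-- _prefix(n)
def pvPrefix (n : Int) : Int :=
  PySem.Int.floordiv n 90 * pvFull + pvSumValid (PySem.Int.mod n 90)

def perfect_alt (A : Int) (B : Int) : Int :=
  if B < A then 0 else pvPrefix (B + 1) - pvPrefix A

-- ===== PRECONDITION & SPEC =====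
def Spec_perfect (A : Int) (B : Int) (out : Int) : Prop := out = perfect_alt A B
instance (A : Int) (B : Int) (out : Int) : Decidable (Spec_perfect A B out) := by unfold Spec_perfect; infer_instance

-- ===== CLAIM (what is proved, stated in full; the proofs are below) =====
def Claim_equal_perfect : Prop := ∀ (A : Int) (B : Int), Dom_perfect A B → Spec_perfect A B (perfect A B)

-- ===== LEMMAS AND PROOFS =====

-- the loop body of A adds the 0/1 indicator pvValid
theorem pv_body_eq (c x : Int) :
    (if PySem.Int.mod x 2 = 0 then c
     else if PySem.Int.mod x 10 = 5 then c
     else if PySem.Int.mod x 3 = 0 ∧ PySem.Int.mod x 9 ≠ 0 then c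
     else c + 1) = c + (if pvValid x then 1 else 0) := by
  unfold pvValid
  rw [PySem.Int.mod_eq_emod_of_pos (by norm_num : (0:Int) < 2),
      PySem.Int.mod_eq_emod_of_pos (by norm_num : (0:Int) < 10),
      PySem.Int.mod_eq_emod_of_pos (by norm_num : (0:Int) < 3),
      PySem.Int.mod_eq_emod_of_pos (by norm_num : (0:Int) < 9)]
  split_ifs <;> simp_all

theorem pvSumValid_step (r : Int) (hr : 0 ≤ r) :
    pvSumValid (r + 1) = pvSumValid r + (if pvValid r then 1 else 0) := by
  unfold pvSumValid
  rw [PySem.List.pyRange_one_succ_right hr, List.foldl_append]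
  simp only [List.foldl]
  split_ifs <;> simp

-- validity only depends on the residue mod 90
theorem pvValid_mod (n : Int) : pvValid n = pvValid (PySem.Int.mod n 90) := by
  have h90 : (0:Int) < 90 := by norm_num
  unfold pvValid
  rw [PySem.Int.mod_eq_emod_of_pos h90]
  rw [PySem.Int.mod_eq_emod_of_pos (by norm_num : (0:Int) < 2),
      PySem.Int.mod_eq_emod_of_pos (by norm_num : (0:Int) < 2),
      PySem.Int.mod_eq_emod_of_pos (by norm_num : (0:Int) < 10),
      PySem.Int.mod_eq_emod_of_pos (by norm_num : (0:Int) < 10),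
      PySem.Int.mod_eq_emod_of_pos (by norm_num : (0:Int) < 3),
      PySem.Int.mod_eq_emod_of_pos (by norm_num : (0:Int) < 3),
      PySem.Int.mod_eq_emod_of_pos (by norm_num : (0:Int) < 9),
      PySem.Int.mod_eq_emod_of_pos (by norm_num : (0:Int) < 9),
      Int.emod_emod_of_dvd n (by norm_num : (2:Int) ∣ 90),
      Int.emod_emod_of_dvd n (by norm_num : (10:Int) ∣ 90),
      Int.emod_emod_of_dvd n (by norm_num : (3:Int) ∣ 90),
      Int.emod_emod_of_dvd n (by norm_num : (9:Int) ∣ 90)]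

theorem pvPrefix_step (n : Int) :
    pvPrefix (n + 1) = pvPrefix n + (if pvValid n then 1 else 0) := by
  have h90 : (0:Int) < 90 := by norm_num
  have hv : pvValid n = pvValid (n % 90) := by
    rw [pvValid_mod n, PySem.Int.mod_eq_emod_of_pos h90]
  unfold pvPrefix
  rw [PySem.Int.floordiv_eq_ediv_of_pos h90, PySem.Int.floordiv_eq_ediv_of_pos h90,
      PySem.Int.mod_eq_emod_of_pos h90, PySem.Int.mod_eq_emod_of_pos h90]
  have hb : 0 ≤ n % 90 ∧ n % 90 < 90 := ⟨Int.emod_nonneg n (by norm_num), Int.emod_lt_of_pos n h90⟩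
  by_cases hr : n % 90 < 89
  · have h1 : (n + 1) % 90 = n % 90 + 1 := by omega
    have h2 : (n + 1) / 90 = n / 90 := by omega
    rw [h1, h2, pvSumValid_step (n % 90) hb.1, hv]
    ring
  · have hr' : n % 90 = 89 := by omega
    have h1 : (n + 1) % 90 = 0 := by omega
    have h2 : (n + 1) / 90 = n / 90 + 1 := by omega
    have hfull : pvFull = pvSumValid 89 + (if pvValid 89 then 1 else 0) := by
      have := pvSumValid_step 89 (by norm_num)
      unfold pvFull
      norm_num at this ⊢
      exact this
    have h0 : pvSumValid 0 = 0 := by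
      unfold pvSumValid
      rw [PySem.List.pyRange_one_eq_nil (le_refl 0)]
      rfl
    rw [h1, h2, h0, hfull, hv, hr']
    ring

theorem pv_main (k : Nat) (A : Int) :
    (PySem.List.pyRange A (A + k) 1).foldl (fun cnt num =>
      if PySem.Int.mod num 2 = 0 then cnt
      else if PySem.Int.mod num 10 = 5 then cnt
      else if PySem.Int.mod num 3 = 0 ∧ PySem.Int.mod num 9 ≠ 0 then cnt
      else cnt + 1) 0 = pvPrefix (A + k) - pvPrefix A := by
  induction k with
  | zero => simp [PySem.List.pyRange_one_eq_nil (le_refl A)]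
  | succ k ih =>
    have h : A ≤ A + (k : Int) := by omega
    have hs : (A + ((k + 1 : Nat) : Int)) = (A + k) + 1 := by push_cast; ring
    rw [hs, PySem.List.pyRange_one_succ_right h, List.foldl_append]
    simp only [List.foldl]
    rw [ih, pv_body_eq, pvPrefix_step]
    ring

-- ===== VERDICT (by name: the statement is the Claim_ definition above) =====
theorem perfect_spec : Claim_equal_perfect := by
  intro A B _
  unfold Spec_perfect perfect perfect_alt
  by_cases hBA : B < A
  · rw [PySem.List.pyRange_one_eq_nil (by omega : B + 1 ≤ A)]
    simp [hBA]
  · have hk : B + 1 = A + ((B + 1 - A).toNat : Int) := by omega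
    rw [hk, pv_main, ← hk, if_neg hBA]
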